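-- pv_equiv track=rewrite | github.com/ymcatar/piano-reduction-current-year | postprocessor/util.py | get_number_of_cluster
-- ===== SOURCE A (Python) =====
-- def get_number_of_cluster(vector, max_hand_span):
--
--     max_cluster_size = 2 * max_hand_span - 1
--     ps_list = [
--         i for i, is_active in enumerate(vector)
--         if int(is_active) not in (0, 11)
--     ]
--
--     if len(ps_list) == 0:  # no note => trivially no cluster
--         return 0
--
--     if len(ps_list) == 1:  # only one note => trivially one cluster
--         return 1
--
--     # all notes are close together
--     if ps_list[-1] - ps_list[0] <= max_cluster_size:
--         return 1
--
--     # greedily expand the left cluster until it is impossible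
--     for i, item in enumerate(ps_list):
--         if item - ps_list[0] > max_cluster_size:
--             return 1 + get_number_of_cluster(vector[item:], max_hand_span)
-- ===== SOURCE B (Python) =====
-- def get_number_of_cluster(vector, max_hand_span):
--     # Single linear pass: greedily start a new cluster whenever the current
--     # active position is too far from the current cluster's starting position.
--     max_cluster_size = 2 * max_hand_span - 1
--     count = 0
--     start = None
--     for i, is_active in enumerate(vector):
--         if int(is_active) in (0, 11):
--             continue
--         if start is None or i - start > max_cluster_size:
--             count += 1
--             start = i
--     return count
-- ===== Notes on version B (the rewrite author's own statement) =====
-- stated objective: simpler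
-- what changed: Replaced A's recursive slice-rebuild-and-rescan (each recursion re-enumerates the sliced vector and rebuilds the active-index list) with a single linear pass over the vector that tracks the current cluster's start index.
import Mathlib
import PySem

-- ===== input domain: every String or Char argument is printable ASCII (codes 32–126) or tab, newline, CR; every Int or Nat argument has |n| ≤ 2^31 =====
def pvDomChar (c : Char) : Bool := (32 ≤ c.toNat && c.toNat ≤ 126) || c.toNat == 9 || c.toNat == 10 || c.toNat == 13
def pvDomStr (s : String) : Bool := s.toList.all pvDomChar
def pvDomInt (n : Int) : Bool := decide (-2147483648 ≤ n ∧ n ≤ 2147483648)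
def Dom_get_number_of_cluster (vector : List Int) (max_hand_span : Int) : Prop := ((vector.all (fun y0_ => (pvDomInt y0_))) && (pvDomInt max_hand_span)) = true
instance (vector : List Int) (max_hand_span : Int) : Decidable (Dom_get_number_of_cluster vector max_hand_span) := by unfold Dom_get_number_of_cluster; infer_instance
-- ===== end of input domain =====

-- B replaces A's recursive slice-rebuild-and-rescan with one linear pass tracking the
-- current cluster's start index (objective: simpler).

-- ===== PORT A =====
-- the list comprehension building ps_list (active indices of `vector`)
def pvPsList (vector : List Int) : List Int :=
  ((PySem.List.enumerate vector).filter (fun p => !(p.2 == 0 || p.2 == 11))).map Prod.fst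

-- fuel-totalised transcription of A's recursion (fuel only makes it total; under
-- Pre_ the fuel `vector.length + 1` is never exhausted)
def get_number_of_cluster_go (fuel : Nat) (vector : List Int) (max_hand_span : Int) : Int :=
  match fuel with
  | 0 => 0
  | fuel + 1 =>
    let max_cluster_size := 2 * max_hand_span - 1
    let ps_list := pvPsList vector
    if ps_list.length = 0 then 0
    else if ps_list.length = 1 then 1
    else if PySem.List.pyGetD ps_list (-1) 0 - PySem.List.pyGetD ps_list 0 0 ≤ max_cluster_size then 1
    else
      -- Python's `for … in enumerate(ps_list)` returns at the FIRST item past the span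
      match ps_list.find? (fun item => decide (max_cluster_size < item - PySem.List.pyGetD ps_list 0 0)) with
      | some item => 1 + get_number_of_cluster_go fuel (PySem.List.slice vector (some item) none) max_hand_span
      | none => 0  -- unreachable: the last element always passes the test in this branch

def get_number_of_cluster (vector : List Int) (max_hand_span : Int) : Int :=
  get_number_of_cluster_go (vector.length + 1) vector max_hand_span

-- ===== PORT B =====
def get_number_of_cluster_alt (vector : List Int) (max_hand_span : Int) : Int :=
  let max_cluster_size := 2 * max_hand_span - 1
  ((PySem.List.enumerate vector).foldl
    (fun (st : Int × Option Int) (p : Int × Int) =>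
      if p.2 == 0 || p.2 == 11 then st
      else match st.2 with
        | none => (st.1 + 1, some p.1)
        | some s => if max_cluster_size < p.1 - s then (st.1 + 1, some p.1) else st)
    (0, none)).1

-- ===== PRECONDITION & SPEC =====
-- Pre_ excludes exactly the inputs on which A never returns (it recurses forever on an
-- unchanged slice and raises RecursionError): max_hand_span ≤ 0 together with at least
-- two active entries.
def Pre_get_number_of_cluster (vector : List Int) (max_hand_span : Int) : Prop :=
  1 ≤ max_hand_span ∨ (vector.filter (fun x => !(x == 0 || x == 11))).length ≤ 1
instance (vector : List Int) (max_hand_span : Int) : Decidable (Pre_get_number_of_cluster vector max_hand_span) := by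
  unfold Pre_get_number_of_cluster; infer_instance

def pvWitness_get_number_of_cluster : List Int × Int := ([1, 0, 0, 1], 1)

def Spec_get_number_of_cluster (vector : List Int) (max_hand_span : Int) (out : Int) : Prop :=
  out = get_number_of_cluster_alt vector max_hand_span
instance (vector : List Int) (max_hand_span : Int) (out : Int) : Decidable (Spec_get_number_of_cluster vector max_hand_span out) := by
  unfold Spec_get_number_of_cluster; infer_instance

-- ===== CLAIM (what is proved, stated in full; the proofs are below) =====
def Claim_equal_get_number_of_cluster : Prop := ∀ (vector : List Int) (max_hand_span : Int), Dom_get_number_of_cluster vector max_hand_span → Pre_get_number_of_cluster vector max_hand_span → Spec_get_number_of_cluster vector max_hand_span (get_number_of_cluster vector max_hand_span)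


-- ===== LEMMAS AND PROOFS =====

-- active indices of `l`, numbered from `k` (the common mathematical object both ports compute with)
def pvAct (k : Int) : List Int → List Int
  | [] => []
  | x :: xs => if x == 0 || x == 11 then pvAct (k + 1) xs else k :: pvAct (k + 1) xs

-- greedy cluster count over a list of positions, current cluster starting at `s`
def pvGo (mcs s : Int) : List Int → Int
  | [] => 0
  | y :: ys => if mcs < y - s then 1 + pvGo mcs y ys else pvGo mcs s ys

def pvClusters (mcs : Int) : List Int → Int
  | [] => 0
  | x :: xs => 1 + pvGo mcs x xs

lemma pvEnum_cons (x : Int) (xs : List Int) (k : Int) :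
    PySem.List.enumerate (x :: xs) k = (k, x) :: PySem.List.enumerate xs (k + 1) := by
  simp [PySem.List.enumerate]

lemma pvPsList_eq_act (v : List Int) : ∀ k, ((PySem.List.enumerate v k).filter (fun p => !(p.2 == 0 || p.2 == 11))).map Prod.fst = pvAct k v := by
  induction v with
  | nil => intro k; simp [PySem.List.enumerate, pvAct]
  | cons x xs ih =>
    intro k
    rw [pvEnum_cons, List.filter_cons]
    by_cases hx : (x == 0 || x == 11) = true
    · rw [if_neg (by simp [hx])]
      simp only [pvAct]
      rw [if_pos hx, ih]
    · rw [if_pos (by simp [hx])]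
      simp only [pvAct]
      rw [if_neg hx, List.map_cons, ih]

lemma pvAct_len (v : List Int) : ∀ k, (pvAct k v).length = (v.filter (fun x => !(x == 0 || x == 11))).length := by
  induction v with
  | nil => intro k; simp [pvAct]
  | cons x xs ih =>
    intro k
    rw [List.filter_cons]
    by_cases hx : (x == 0 || x == 11) = true
    · rw [if_neg (by simp [hx])]
      simp only [pvAct]
      rw [if_pos hx]
      exact ih (k + 1)
    · rw [if_pos (by simp [hx])]
      simp only [pvAct]
      rw [if_neg hx]
      simp [ih (k + 1)]

lemma pvAct_bound (v : List Int) : ∀ k y, y ∈ pvAct k v → k ≤ y ∧ y < k + v.length := by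
  induction v with
  | nil => intro k y hy; simp [pvAct] at hy
  | cons x xs ih =>
    intro k y hy
    by_cases hx : (x == 0 || x == 11) = true
    · simp only [pvAct, hx, if_pos] at hy
      have := ih (k + 1) y hy
      constructor <;> [omega; (simp only [List.length_cons]; push_cast; omega)]
    · simp only [pvAct, hx, if_neg, Bool.not_eq_true, List.mem_cons] at hy
      rcases hy with rfl | hy
      · constructor <;> [omega; (simp only [List.length_cons]; push_cast; omega)]
      · have := ih (k + 1) y (by simpa using hy)
        constructor <;> [omega; (simp only [List.length_cons]; push_cast; omega)]

lemma pvAct_mem (v : List Int) : ∀ k y, y ∈ pvAct k v →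
    ∃ j : Nat, y = k + (j : Int) ∧ ∃ hj : j < v.length, ¬(v[j] = 0 ∨ v[j] = 11) := by
  induction v with
  | nil => intro k y hy; simp [pvAct] at hy
  | cons x xs ih =>
    intro k y hy
    by_cases hx : (x == 0 || x == 11) = true
    · simp only [pvAct, hx, if_pos] at hy
      obtain ⟨j, hj1, hj2, hj3⟩ := ih (k + 1) y hy
      exact ⟨j + 1, by push_cast; omega, by simpa using hj2, by simpa using hj3⟩
    · simp only [pvAct, hx, if_neg, Bool.not_eq_true, List.mem_cons] at hy
      rcases hy with rfl | hy
      · refine ⟨0, by simp, by simp, ?_⟩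
        simpa using hx
      · obtain ⟨j, hj1, hj2, hj3⟩ := ih (k + 1) (y) (by simpa using hy)
        exact ⟨j + 1, by push_cast; omega, by simpa using hj2, by simpa using hj3⟩

lemma pvAct_sorted (v : List Int) : ∀ k, (pvAct k v).Pairwise (· < ·) := by
  induction v with
  | nil => intro k; simp [pvAct]
  | cons x xs ih =>
    intro k
    by_cases hx : (x == 0 || x == 11) = true
    · simpa [pvAct, hx] using ih (k + 1)
    · simp only [pvAct, hx, if_neg, Bool.not_eq_true]
      exact List.Pairwise.cons (fun y hy => by have := pvAct_bound xs (k + 1) y hy; omega) (ih (k + 1))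

lemma pvAct_append (a : List Int) : ∀ (b : List Int) (k : Int), pvAct k (a ++ b) = pvAct k a ++ pvAct (k + (a.length : Int)) b := by
  induction a with
  | nil => intro b k; simp [pvAct]
  | cons x xs ih =>
    intro b k
    by_cases hx : (x == 0 || x == 11) = true
    · simp only [List.cons_append, pvAct, hx, if_pos, ih, List.length_cons]
      norm_num; ring_nf
    · simp only [List.cons_append, pvAct, hx, if_neg, Bool.not_eq_true, ih, List.length_cons]
      norm_num; ring_nf

lemma pvAct_shift (v : List Int) : ∀ k c, pvAct (k + c) v = (pvAct k v).map (· + c) := by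
  induction v with
  | nil => intro k c; simp [pvAct]
  | cons x xs ih =>
    intro k c
    by_cases hx : (x == 0 || x == 11) = true
    · simp only [pvAct, hx, if_pos]
      have : k + c + 1 = (k + 1) + c := by ring
      rw [this, ih]
    · simp only [pvAct, hx, if_neg, Bool.not_eq_true, List.map_cons]
      have : k + c + 1 = (k + 1) + c := by ring
      rw [this, ih]

lemma pvGo_zero (mcs s : Int) : ∀ l, (∀ y ∈ l, ¬ mcs < y - s) → pvGo mcs s l = 0 := by
  intro l
  induction l with
  | nil => intro _; rfl
  | cons y ys ih =>
    intro h
    have hy := h y (by simp)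
    simp only [pvGo, if_neg hy]
    exact ih (fun z hz => h z (by simp [hz]))

lemma pvGo_split (mcs s item : Int) (post : List Int) :
    ∀ pre, (∀ y ∈ pre, ¬ mcs < y - s) → mcs < item - s →
    pvGo mcs s (pre ++ item :: post) = 1 + pvGo mcs item post := by
  intro pre
  induction pre with
  | nil => intro _ hit; simp [pvGo, if_pos hit]
  | cons y ys ih =>
    intro h hit
    have hy := h y (by simp)
    simp only [List.cons_append, pvGo, if_neg hy]
    exact ih (fun z hz => h z (by simp [hz])) hit

lemma pvGo_map_add (mcs c : Int) : ∀ l s, pvGo mcs (s + c) (l.map (· + c)) = pvGo mcs s l := by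
  intro l
  induction l with
  | nil => intro s; rfl
  | cons y ys ih =>
    intro s
    simp only [List.map_cons, pvGo]
    have : y + c - (s + c) = y - s := by ring
    rw [this]
    split_ifs with h
    · rw [ih y]
    · rw [ih s]

lemma pvClusters_map_add (mcs c : Int) (l : List Int) : pvClusters mcs (l.map (· + c)) = pvClusters mcs l := by
  cases l with
  | nil => rfl
  | cons x xs => simp only [List.map_cons, pvClusters, pvGo_map_add]

lemma pvSorted_le_getLast (l : List Int) : ∀ (h : l ≠ []), l.Pairwise (· < ·) → ∀ y ∈ l, y ≤ l.getLast h := by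
  induction l with
  | nil => intro h; exact absurd rfl h
  | cons x xs ih =>
    intro h hp y hy
    cases xs with
    | nil => simp at hy; simp [hy]
    | cons z zs =>
      rw [List.getLast_cons (by simp)]
      rcases List.mem_cons.mp hy with rfl | hy'
      · have hmem := List.getLast_mem (l := z :: zs) (by simp)
        have := (List.pairwise_cons.mp hp).1 _ hmem
        omega
      · exact ih (by simp) (List.pairwise_cons.mp hp).2 y hy'

lemma pvB_fold (mcs : Int) (v : List Int) : ∀ (k c : Int) (s? : Option Int),
    ((PySem.List.enumerate v k).foldl
      (fun (st : Int × Option Int) (p : Int × Int) =>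
        if p.2 == 0 || p.2 == 11 then st
        else match st.2 with
          | none => (st.1 + 1, some p.1)
          | some s => if mcs < p.1 - s then (st.1 + 1, some p.1) else st)
      (c, s?)).1
    = c + (match s? with
           | none => pvClusters mcs (pvAct k v)
           | some s => pvGo mcs s (pvAct k v)) := by
  induction v with
  | nil =>
    intro k c s?
    cases s? <;> simp [PySem.List.enumerate, pvAct, pvClusters, pvGo]
  | cons x xs ih =>
    intro k c s?
    rw [pvEnum_cons, List.foldl_cons]
    by_cases hx : (x == 0 || x == 11) = true
    · cases s? with
      | none =>
        have h1 := ih (k + 1) c none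
        simp only [pvAct, hx, if_true] at h1 ⊢
        exact h1
      | some s =>
        have h1 := ih (k + 1) c (some s)
        simp only [pvAct, hx, if_true] at h1 ⊢
        exact h1
    · cases s? with
      | none =>
        have h1 := ih (k + 1) (c + 1) (some k)
        simp only [pvAct, hx, Bool.false_eq_true, if_false, pvClusters] at h1 ⊢
        rw [h1]; omega
      | some s =>
        by_cases hlt : mcs < k - s
        · have h1 := ih (k + 1) (c + 1) (some k)
          simp only [pvAct, hx, Bool.false_eq_true, if_false, pvGo, hlt, if_true] at h1 ⊢
          rw [h1]; omega
        · have h1 := ih (k + 1) c (some s)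
          simp only [pvAct, hx, Bool.false_eq_true, if_false, pvGo, hlt] at h1 ⊢
          exact h1

lemma pvB_eq (v : List Int) (h : Int) :
    get_number_of_cluster_alt v h = pvClusters (2 * h - 1) (pvAct 0 v) := by
  unfold get_number_of_cluster_alt
  rw [pvB_fold (2 * h - 1) v 0 0 none]
  simp

lemma pvA_main : ∀ (fuel : Nat) (v : List Int) (h : Int), v.length < fuel →
    Pre_get_number_of_cluster v h →
    get_number_of_cluster_go fuel v h = pvClusters (2 * h - 1) (pvAct 0 v) := by
  intro fuel
  induction fuel with
  | zero => intro v h hf; omega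
  | succ fuel ih =>
    intro v h hf hpre
    rw [get_number_of_cluster_go]
    have hps : pvPsList v = pvAct 0 v := pvPsList_eq_act v 0
    simp only [hps]
    cases hact : pvAct 0 v with
    | nil => simp [pvClusters]
    | cons x tl =>
      cases tl with
      | nil => simp [pvClusters, pvGo]
      | cons y rest =>
        have hnil : (x :: y :: rest : List Int) ≠ [] := by simp
        have hsorted : (x :: y :: rest).Pairwise (· < ·) := hact ▸ pvAct_sorted v 0
        simp only [List.length_cons, PySem.List.pyGetD_zero_cons,
          PySem.List.pyGetD_neg_one (x :: y :: rest) 0 hnil]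
        have hlen2 : ¬ ((x :: y :: rest).length = 0) := by simp
        rw [if_neg (by simp), if_neg (by simp)]
        by_cases hclose : (x :: y :: rest).getLast hnil - x ≤ 2 * h - 1
        · rw [if_pos hclose]
          have : pvGo (2 * h - 1) x (y :: rest) = 0 := by
            apply pvGo_zero
            intro z hz
            have hzl : z ≤ (x :: y :: rest).getLast hnil :=
              pvSorted_le_getLast (x :: y :: rest) hnil hsorted z (by simp [hz])
            omega
          simp [pvClusters, this]
        · rw [if_neg hclose]
          -- find? returns some item: the last element passes the test
          cases hfind : (x :: y :: rest).find? (fun item => decide (2 * h - 1 < item - x)) with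
          | none =>
            exfalso
            have hlast := List.getLast_mem hnil
            have hnot : ¬ (2 * h - 1 < (x :: y :: rest).getLast hnil - x) := by
              have := List.find?_eq_none.mp hfind _ hlast
              simpa using this
            omega
          | some item =>
            obtain ⟨hpred, pre, post, hsplit, hpre_fail⟩ := List.find?_eq_some_iff_append.mp hfind
            have hitem : 2 * h - 1 < item - x := by simpa using hpred
            have hitem_mem : item ∈ pvAct 0 v := by rw [hact, hsplit]; simp
            obtain ⟨m, hm_eq, hm_lt, hm_act⟩ := pvAct_mem v 0 item hitem_mem
            have hm_eq' : item = (m : Int) := by omega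
            -- the Pre_ branch with ≤ 1 active entries is impossible here
            have hh1 : 1 ≤ h := by
              rcases hpre with hh | hlen
              · exact hh
              · exfalso
                have hlenact := pvAct_len v 0
                rw [hact] at hlenact
                simp only [List.length_cons] at hlenact
                omega
            have hx0 : 0 ≤ x := by
              have : x ∈ pvAct 0 v := by rw [hact]; simp
              exact (pvAct_bound v 0 x this).1
            have hm2 : 2 ≤ (m : Int) := by omega
            -- the slice is v.drop m
            have hslice : PySem.List.slice v (some item) none = v.drop m := by
              rw [hm_eq']; exact PySem.List.slice_from_natCast v m
            show 1 + get_number_of_cluster_go fuel (PySem.List.slice v (some item) none) h =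
              pvClusters (2 * h - 1) (x :: y :: rest)
            rw [hslice]
            -- decompose pvAct 0 v at position m
            have htake_len : (v.take m).length = m := by simp [Nat.le_of_lt hm_lt]
            have hdrop_cons : v.drop m = v[m] :: v.drop (m + 1) := List.drop_eq_getElem_cons hm_lt
            have hdrop_act : pvAct ((m : Int)) (v.drop m) = (m : Int) :: pvAct ((m : Int) + 1) (v.drop (m + 1)) := by
              rw [hdrop_cons]
              have : (v[m] == 0 || v[m] == 11) = false := by
                simp only [Bool.or_eq_false_iff, beq_eq_false_iff_ne, ne_eq]
                exact ⟨fun hz => hm_act (Or.inl hz), fun hz => hm_act (Or.inr hz)⟩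
              simp [pvAct, this]
            have hdecomp : pvAct 0 v = pvAct 0 (v.take m) ++ ((m : Int) :: pvAct ((m : Int) + 1) (v.drop (m + 1))) := by
              conv_lhs => rw [← List.take_append_drop m v]
              rw [pvAct_append, htake_len, ← hdrop_act]
              norm_num
            -- the dropped part's clusters equal the clusters of (item :: T)
            have hshift : pvAct ((m : Int)) (v.drop m) = (pvAct 0 (v.drop m)).map (· + (m : Int)) := by
              have := pvAct_shift (v.drop m) 0 ((m : Int))
              simpa using this
            have hrec : get_number_of_cluster_go fuel (v.drop m) h = pvClusters (2 * h - 1) (pvAct 0 (v.drop m)) := by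
              apply ih
              · have : (v.drop m).length = v.length - m := by simp
                omega
              · exact Or.inl hh1
            rw [hrec]
            have hdropclusters : pvClusters (2 * h - 1) (pvAct 0 (v.drop m)) =
                pvClusters (2 * h - 1) ((m : Int) :: pvAct ((m : Int) + 1) (v.drop (m + 1))) := by
              rw [← hdrop_act, hshift, pvClusters_map_add]
            rw [hdropclusters]
            -- set L := pvAct 0 (v.take m), T := pvAct (m+1) (v.drop (m+1))
            set L := pvAct 0 (v.take m) with hL
            set T := pvAct ((m : Int) + 1) (v.drop (m + 1)) with hT
            -- every z in the whole list with the pred ≥ item; elements of L are < m, so they fail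
            have hminimal : ∀ z ∈ (x :: y :: rest : List Int), 2 * h - 1 < z - x → item ≤ z := by
              intro z hz hzpred
              rw [hsplit] at hz hsorted
              rcases List.mem_append.mp hz with hz | hz
              · exact absurd (by simpa using hzpred) (by simpa using hpre_fail z hz)
              · rcases List.mem_cons.mp hz with rfl | hz
                · exact le_refl _
                · have := ((List.pairwise_append.mp hsorted).2.1)
                  have := (List.pairwise_cons.mp this).1 z hz
                  omega
            have hLfail : ∀ z ∈ L, ¬ (2 * h - 1 < z - x) := by
              intro z hz hzpred
              have hzb := (pvAct_bound (v.take m) 0 z hz).2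
              rw [htake_len] at hzb
              have hzmem : z ∈ (x :: y :: rest : List Int) := by
                rw [hact] at hdecomp; rw [hdecomp]; simp [hz]
              have := hminimal z hzmem hzpred
              omega
            -- L is nonempty with head x
            have hdecomp' : (x :: y :: rest : List Int) = L ++ ((m : Int) :: T) := by
              rw [← hact]; exact hdecomp
            cases hLc : L with
            | nil =>
              exfalso
              rw [hLc] at hdecomp'
              have hxm : x = (m : Int) := by
                have := congrArg (·.head?) hdecomp'
                simpa using this
              omega
            | cons l0 L' =>
              rw [hLc] at hdecomp'
              have hl0 : l0 = x := by
                have := congrArg (·.head?) hdecomp'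
                simpa using this.symm
              rw [hl0] at hdecomp'
              have htail : (y :: rest : List Int) = L' ++ ((m : Int) :: T) := by
                simpa using hdecomp'
              have hL'fail : ∀ z ∈ L', ¬ (2 * h - 1 < z - x) := by
                intro z hz
                exact hLfail z (by rw [hLc, hl0]; simp [hz])
              calc 1 + pvClusters (2 * h - 1) ((m : Int) :: T)
                  = 1 + (1 + pvGo (2 * h - 1) ((m : Int)) T) := rfl
                _ = pvClusters (2 * h - 1) (x :: y :: rest) := by
                    show _ = 1 + pvGo (2 * h - 1) x (y :: rest)
                    rw [htail, pvGo_split (2 * h - 1) x ((m : Int)) T L' hL'fail (by omega)]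

-- ===== VERDICT (by name: the statement is the Claim_ definition above) =====
theorem get_number_of_cluster_spec : Claim_equal_get_number_of_cluster := by
  intro v h _hdom hpre
  unfold Spec_get_number_of_cluster
  rw [pvB_eq]
  exact pvA_main (v.length + 1) v h (Nat.lt_succ_self _) hpre
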